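/- GENERATED by tools/from_farm_form.py from prooffarm-gif/accepted/DGifSetupDecompress.1/Proof.lean (a worked proof of the farm's unit `DGifSetupDecompress.1`,
   accepted by the verdict) — do not edit. -/
import Gif.Spec.Units.DGifSetupDecompress_1
import Gif.Spec.AllSegs
import Gif.Spec.Proved.DGifSetupDecompress_1_Lemmas

open X86 X86.User Asan ProgX.Base ProgX.Base.Spec Gif.Spec

/-!
  `DGifSetupDecompress.1` (0x1061c8 … 0x106205 and the two error arms 0x1062e6 … 0x106314, 24 instructions; dgif_lib.c:817-831):
  A BODY SEGMENT OF A PROTECTED FUNCTION WITH A CALL IN THE MIDDLE. The call's return address 0x1061e7 (`ret2`) is not a cut of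
  the design, so the unit makes it one of its own: a private assertion `sd1_AtRet2` (`Body` + what is live there) and two walks
  (Lemmas.lean), chained here. The recipe of each walk is farm.gif/hints/protected_frame.md (BODY SEGMENT); the model is
  farm.gif/worked/DGifGetWord.1.
-/

/-- Segment 1 of `DGifSetupDecompress` takes `AfterP` at 0x1061c8 to `AtStores` at 0x106205 or to `Done` at 0x10633a. -/
theorem Gif.Spec.Proved.DGifSetupDecompress_1_ok : Gif.Spec.DGifSetupDecompress_1.Statement := by
  intro Lay hLay μ hμ u₀ hcode h_InternalRead h_asan_load8_noabort h_asan_store4_noabort H rest frames F R e ret v hat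
  -- the callee's contract for the frame list of the body (the own frame in front) and the request of 1 byte
  have hir := h_InternalRead H rest (DGifSetupDecompress.framesIn frames e) F R 1
  -- 0x1061c8 … the checked load of `Private`, the call of InternalRead … 0x1061e7
  refine (Gif.Spec.DGifSetupDecompress_1.sd1_seg_call Lay hLay μ hμ u₀ hcode H rest frames F R e ret hir
    h_asan_load8_noabort v hat).trans ?_
  -- 0x1061e7 … 0x106205 (accepted) | 0x10633a (the two error arms)
  intro v1 hv1
  exact Gif.Spec.DGifSetupDecompress_1.sd1_seg_tail Lay hLay μ hμ u₀ hcode H rest frames F R e ret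
    h_asan_store4_noabort v1 hv1
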